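-- pv_equiv track=rewrite | github.com/FabriceGhislain7/python-dev-portfolio | web_projects/gdr-web-app/auth/password_manager.py | _find_repeated_chars
-- ===== SOURCE A (Python) =====
-- from typing import Dict, List, Tuple, Optional
--
-- def _find_repeated_chars(password: str) -> Optional[str]:
--     """Trova sequenze di caratteri ripetuti."""
--     for i in range(len(password) - 2):
--         if password[i] == password[i+1] == password[i+2]:
--             # Trova tutta la sequenza ripetuta
--             j = i + 3
--             while j < len(password) and password[j] == password[i]:
--                 j += 1
--             return password[i:j]
--     return None
-- ===== SOURCE B (Python) =====
-- def _find_repeated_chars(password: str):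
--     """Run-length encode the password in one pass, then return the first run of length >= 3."""
--     runs = []
--     for ch in password:
--         if runs and runs[-1][0] == ch:
--             runs[-1] = (ch, runs[-1][1] + 1)
--         else:
--             runs.append((ch, 1))
--     for ch, n in runs:
--         if n >= 3:
--             return ch * n
--     return None
-- ===== Notes on version B (the rewrite author's own statement) =====
-- stated objective: alternative
-- what changed: Replaced the triple-index scan with extend-on-match by a single run-length-encoding pass over the characters followed by a scan of the runs for the first run of length >= 3.
import Mathlib
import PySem

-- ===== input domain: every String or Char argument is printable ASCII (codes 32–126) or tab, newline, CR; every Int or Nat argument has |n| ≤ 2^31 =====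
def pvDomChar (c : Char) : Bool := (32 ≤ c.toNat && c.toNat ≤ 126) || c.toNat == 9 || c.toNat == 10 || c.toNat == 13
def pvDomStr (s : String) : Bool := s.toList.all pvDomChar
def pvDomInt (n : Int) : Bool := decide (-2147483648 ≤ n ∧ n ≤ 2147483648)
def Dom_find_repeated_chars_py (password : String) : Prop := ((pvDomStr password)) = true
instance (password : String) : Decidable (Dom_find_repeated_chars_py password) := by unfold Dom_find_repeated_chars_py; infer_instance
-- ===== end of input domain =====

-- B replaces A's triple-index scan + extension loop by one run-length-encoding pass then a scan of the runs (alternative decomposition, same cost).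

-- ===== PORT A =====
-- inner while loop: j = i + 3; while j < len(password) and password[j] == password[i]: j += 1
def pvAExtend (cs : List Char) (c : Char) (j : Nat) : Nat :=
  if h : j < cs.length then
    if cs[j] = c then pvAExtend cs c (j + 1) else j
  else j
termination_by cs.length - j

-- outer for loop over i in range(len(password) - 2), early return via Option
def pvALoop (cs : List Char) (i : Nat) : Option (List Char) :=
  if h : i + 2 < cs.length then
    if cs[i] = cs[i+1] ∧ cs[i+1] = cs[i+2] then
      some (PySem.List.slice cs (some (i : Int)) (some ((pvAExtend cs cs[i] (i + 3) : Nat) : Int)))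
    else pvALoop cs (i + 1)
  else none
termination_by cs.length - i

def find_repeated_chars_py (password : String) : Option String :=
  (pvALoop password.toList 0).map String.ofList

-- ===== PORT B =====
-- one step of the RLE pass: extend the last run or start a new one
def pvBStep (rs : List (Char × Nat)) (ch : Char) : List (Char × Nat) :=
  match rs.getLast? with
  | some (c, n) => if c = ch then rs.dropLast ++ [(ch, n + 1)] else rs ++ [(ch, 1)]
  | none => [(ch, 1)]

def pvBRuns (cs : List Char) : List (Char × Nat) := cs.foldl pvBStep []

-- second loop: first run with n >= 3, returned as ch * n
def pvBPick : List (Char × Nat) → Option String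
  | [] => none
  | (c, n) :: t => if 3 ≤ n then some (String.ofList (List.replicate n c)) else pvBPick t

def find_repeated_chars_py_alt (password : String) : Option String :=
  pvBPick (pvBRuns password.toList)

-- ===== PRECONDITION & SPEC =====
def Spec_find_repeated_chars_py (password : String) (out : Option String) : Prop := out = find_repeated_chars_py_alt password
instance (password : String) (out : Option String) : Decidable (Spec_find_repeated_chars_py password out) := by unfold Spec_find_repeated_chars_py; infer_instance

-- ===== CLAIM (what is proved, stated in full; the proofs are below) =====
def Claim_equal_find_repeated_chars_py : Prop := ∀ (password : String), Dom_find_repeated_chars_py password → Spec_find_repeated_chars_py password (find_repeated_chars_py password)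

-- ===== LEMMAS AND PROOFS =====

-- structural counterpart of A's index loop: scan suffixes, extend a found triple with takeWhile
def pvScanL : List Char → Option (List Char)
  | a :: b :: c :: rest => if a = b ∧ b = c then some (a :: b :: c :: rest.takeWhile (fun x => x = a)) else pvScanL (b :: c :: rest)
  | _ => none

-- structural run-length encoding (front recursion), used to characterise pvBRuns
def pvRunsGo (c : Char) (n : Nat) : List Char → List (Char × Nat)
  | [] => [(c, n)]
  | x :: xs => if x = c then pvRunsGo c (n + 1) xs else (c, n) :: pvRunsGo x 1 xs

def pvRunsF : List Char → List (Char × Nat)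
  | [] => []
  | c :: rest => pvRunsGo c 1 rest

theorem pv_foldl_pvBStep (l : List Char) : ∀ (rs : List (Char × Nat)) (c : Char) (n : Nat),
    List.foldl pvBStep (rs ++ [(c, n)]) l = rs ++ pvRunsGo c n l := by
  induction l with
  | nil => intro rs c n; simp [pvRunsGo]
  | cons x xs ih =>
    intro rs c n
    by_cases h : c = x
    · subst h
      have e1 : pvBStep (rs ++ [(c, n)]) c = rs ++ [(c, n + 1)] := by
        simp [pvBStep]
      rw [List.foldl_cons, e1, ih rs c (n + 1)]
      simp [pvRunsGo]
    · have h' : x ≠ c := fun e => h e.symm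
      have e1 : pvBStep (rs ++ [(c, n)]) x = (rs ++ [(c, n)]) ++ [(x, 1)] := by
        simp [pvBStep, h]
      rw [List.foldl_cons, e1, ih (rs ++ [(c, n)]) x 1]
      simp [pvRunsGo, h']

theorem pvBRuns_eq (cs : List Char) : pvBRuns cs = pvRunsF cs := by
  cases cs with
  | nil => rfl
  | cons c rest =>
    have := pv_foldl_pvBStep rest [] c 1
    simpa [pvBRuns, pvBStep, pvRunsF] using this

theorem pvAExtend_eq (cs : List Char) (c : Char) (j : Nat) :
    pvAExtend cs c j = j + ((cs.drop j).takeWhile (fun x => x = c)).length := by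
  fun_induction pvAExtend cs c j with
  | case1 j h hc ih =>
    rw [ih, List.drop_eq_getElem_cons h, List.takeWhile_cons]
    simp only [hc, decide_true, if_true, List.length_cons]
    omega
  | case2 j h hc =>
    rw [List.drop_eq_getElem_cons h, List.takeWhile_cons]
    simp [hc]
  | case3 j h =>
    rw [List.drop_eq_nil_iff.mpr (by omega)]
    simp

theorem pv_take_takeWhile (l : List Char) (p : Char → Bool) :
    l.take (l.takeWhile p).length = l.takeWhile p :=
  (List.prefix_iff_eq_take.mp (List.takeWhile_prefix p)).symm

theorem pvALoop_eq (cs : List Char) (i : Nat) : pvALoop cs i = pvScanL (cs.drop i) := by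
  fun_induction pvALoop cs i with
  | case1 i h hc =>
    have d0 : cs.drop i = cs[i] :: cs.drop (i + 1) := List.drop_eq_getElem_cons (by omega)
    have d1 : cs.drop (i + 1) = cs[i+1] :: cs.drop (i + 2) := List.drop_eq_getElem_cons (by omega)
    have d2 : cs.drop (i + 2) = cs[i+2] :: cs.drop (i + 3) := List.drop_eq_getElem_cons (by omega)
    rw [pvAExtend_eq cs cs[i] (i + 3)]
    have hcast : ((i + 3 + ((cs.drop (i + 3)).takeWhile (fun x => x = cs[i])).length : Nat) : Int)
        = ((i : Nat) : Int) + ((3 + ((cs.drop (i + 3)).takeWhile (fun x => x = cs[i])).length : Nat) : Int) := by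
      push_cast; ring
    rw [hcast, PySem.List.slice_natCast_add, d0, d1, d2]
    rw [show 3 + ((cs.drop (i + 3)).takeWhile (fun x => x = cs[i])).length
        = ((cs.drop (i + 3)).takeWhile (fun x => x = cs[i])).length + 1 + 1 + 1 from by omega]
    simp only [List.take_succ_cons]
    simp only [pvScanL, if_pos hc]
    rw [pv_take_takeWhile]
  | case2 i h hc ih =>
    have d0 : cs.drop i = cs[i] :: cs.drop (i + 1) := List.drop_eq_getElem_cons (by omega)
    have d1 : cs.drop (i + 1) = cs[i+1] :: cs.drop (i + 2) := List.drop_eq_getElem_cons (by omega)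
    have d2 : cs.drop (i + 2) = cs[i+2] :: cs.drop (i + 3) := List.drop_eq_getElem_cons (by omega)
    rw [ih, d0, d1, d2]
    simp only [pvScanL, if_neg hc]
  | case3 i h =>
    have h2 : (cs.drop i).length ≤ 2 := by simp; omega
    rcases hd : cs.drop i with _ | ⟨a, _ | ⟨b, _ | ⟨c', t⟩⟩⟩
    · simp [pvScanL]
    · simp [pvScanL]
    · simp [pvScanL]
    · exfalso; rw [hd] at h2; simp at h2

theorem pvScanL_cons_ne (a b : Char) (l : List Char) (h : a ≠ b) :
    pvScanL (a :: b :: l) = pvScanL (b :: l) := by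
  cases l with
  | nil => simp [pvScanL]
  | cons c t => simp [pvScanL, h]

theorem pvRunsGo_replicate (k : Nat) (c : Char) (n : Nat) (r : List Char) :
    pvRunsGo c n (List.replicate k c ++ r) = pvRunsGo c (n + k) r := by
  induction k generalizing n with
  | zero => simp
  | succ k ih =>
    simp only [List.replicate_succ, List.cons_append, pvRunsGo]
    rw [ih (n + 1), show n + 1 + k = n + (k + 1) from by omega]
    simp

theorem pvRunsGo_stop (c : Char) (n : Nat) (r : List Char) (h : r.head? ≠ some c) :
    pvRunsGo c n r = (c, n) :: pvRunsF r := by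
  cases r with
  | nil => simp [pvRunsGo, pvRunsF]
  | cons x xs =>
    have hx : x ≠ c := by intro e; exact h (by simp [e])
    simp [pvRunsGo, pvRunsF, hx]

theorem pvScanL_replicate (m : Nat) (c : Char) (r : List Char) (h : r.head? ≠ some c) :
    pvScanL (List.replicate m c ++ r) = if 3 ≤ m then some (List.replicate m c) else pvScanL r := by
  have hr0 : r.takeWhile (fun x => x = c) = [] := by
    cases r with
    | nil => simp
    | cons x xs =>
      have hx : x ≠ c := by intro e; exact h (by simp [e])
      simp [List.takeWhile_cons, hx]
  match m with
  | 0 => simp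
  | 1 =>
    simp only [show ¬ (3 ≤ 1) from by omega, if_false, List.replicate_one, List.cons_append, List.nil_append]
    cases r with
    | nil => simp [pvScanL]
    | cons x xs =>
      have hx : c ≠ x := by intro e; exact h (by simp [e.symm])
      exact pvScanL_cons_ne c x xs hx
  | 2 =>
    simp only [show ¬ (3 ≤ 2) from by omega, if_false]
    cases r with
    | nil => simp [pvScanL]
    | cons x xs =>
      have hx : c ≠ x := by intro e; exact h (by simp [e.symm])
      show pvScanL (c :: c :: x :: xs) = pvScanL (x :: xs)
      rw [show pvScanL (c :: c :: x :: xs) = pvScanL (c :: x :: xs) from by simp [pvScanL, hx]]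
      exact pvScanL_cons_ne c x xs hx
  | (k + 3) =>
    simp only [show 3 ≤ k + 3 from by omega, if_true]
    show pvScanL (c :: c :: c :: (List.replicate k c ++ r)) = _
    simp [pvScanL, List.takeWhile_append, List.takeWhile_replicate, hr0, List.replicate_succ]

theorem pvScan_pick : ∀ (N : Nat) (cs : List Char), cs.length ≤ N →
    (pvScanL cs).map String.ofList = pvBPick (pvRunsF cs) := by
  intro N
  induction N with
  | zero =>
    intro cs hlen
    rw [List.length_eq_zero_iff.mp (Nat.le_zero.mp hlen)]
    simp [pvScanL, pvRunsF, pvBPick]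
  | succ N ih =>
    intro cs hlen
    cases cs with
    | nil => simp [pvScanL, pvRunsF, pvBPick]
    | cons c rest =>
      have hrest : rest.takeWhile (fun x => x = c) ++ rest.dropWhile (fun x => x = c) = rest :=
        List.takeWhile_append_dropWhile
      have htrep : rest.takeWhile (fun x => x = c)
          = List.replicate (rest.takeWhile (fun x => x = c)).length c := by
        rw [List.eq_replicate_iff]
        refine ⟨rfl, fun b hb => ?_⟩
        simpa using List.mem_takeWhile_imp hb
      have hhd : (rest.dropWhile (fun x => x = c)).head? ≠ some c := by
        have hmatch := List.head?_dropWhile_not (fun x => decide (x = c)) rest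
        cases hh : (rest.dropWhile (fun x => x = c)).head? with
        | none => simp
        | some x =>
          rw [hh] at hmatch
          simp only [decide_eq_false_iff_not] at hmatch
          simp [hmatch]
      have hcs : c :: rest
          = List.replicate ((rest.takeWhile (fun x => x = c)).length + 1) c
              ++ rest.dropWhile (fun x => x = c) := by
        conv_lhs => rw [← hrest]
        rw [htrep]
        simp [List.replicate_succ]
      rw [hcs, pvScanL_replicate _ c _ hhd]
      have hruns : pvRunsF (List.replicate ((rest.takeWhile (fun x => x = c)).length + 1) c
              ++ rest.dropWhile (fun x => x = c))
          = (c, (rest.takeWhile (fun x => x = c)).length + 1)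
              :: pvRunsF (rest.dropWhile (fun x => x = c)) := by
        rw [List.replicate_succ]
        show pvRunsF (c :: (List.replicate (rest.takeWhile (fun x => x = c)).length c
              ++ rest.dropWhile (fun x => x = c))) = _
        simp only [pvRunsF]
        rw [pvRunsGo_replicate, pvRunsGo_stop c _ _ hhd, Nat.add_comm 1]
        rfl
      rw [hruns]
      have hrlen : (rest.dropWhile (fun x => x = c)).length ≤ N := by
        have h1 := List.length_dropWhile_le (fun x => decide (x = c)) rest
        simp at hlen
        omega
      simp only [pvBPick]
      split_ifs with h3
      · simp
      · exact ih _ hrlen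

-- ===== VERDICT (by name: the statement is the Claim_ definition above) =====
theorem find_repeated_chars_py_spec : Claim_equal_find_repeated_chars_py := by
  intro password _
  unfold Spec_find_repeated_chars_py find_repeated_chars_py find_repeated_chars_py_alt
  rw [pvALoop_eq, List.drop_zero, pvBRuns_eq]
  exact pvScan_pick password.toList.length password.toList le_rfl
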